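-- pv_equiv track=rewrite | github.com/NekoRollex/SW305_Problemas | Algoritmo Naive/p04_MC.py | BusquedaNaive
-- ===== SOURCE A (Python) =====
-- def BusquedaNaive(cadena: str , patron: str):
--     posiciones = []
--     i = 0
--     j = 0
--     n1 = len(cadena)
--     n2 = len(patron)
--
--     if n1 < n2:
--         return None
--
--     while i < n1:
--         if cadena[i] == patron[0]:
--             k = i
--             j = 0
--             while (k < n1 and j < n2) and patron[j] == cadena[k]:
--                 k += 1
--                 j += 1
--             if j == n2:
--                 posiciones.append(i)
--         i += 1
--     return posiciones
-- ===== SOURCE B (Python) =====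
-- def BusquedaNaive(cadena: str, patron: str):
--     if len(cadena) < len(patron):
--         return None
--     posiciones = []
--     pos = cadena.find(patron)
--     while pos != -1:
--         posiciones.append(pos)
--         pos = cadena.find(patron, pos + 1)
--     return posiciones
-- ===== Notes on version B (the rewrite author's own statement) =====
-- stated objective: faster
-- what changed: Replaces the hand-written char-by-char double loop with a loop of cadena.find(patron, start) calls, so the scanning is done by CPython's C-level Crochemore-Perrin substring search instead of Python-level index arithmetic.
-- outside the precondition, e.g. on BusquedaNaive('', ''): A returns [], B returns [0]
import Mathlib
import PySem

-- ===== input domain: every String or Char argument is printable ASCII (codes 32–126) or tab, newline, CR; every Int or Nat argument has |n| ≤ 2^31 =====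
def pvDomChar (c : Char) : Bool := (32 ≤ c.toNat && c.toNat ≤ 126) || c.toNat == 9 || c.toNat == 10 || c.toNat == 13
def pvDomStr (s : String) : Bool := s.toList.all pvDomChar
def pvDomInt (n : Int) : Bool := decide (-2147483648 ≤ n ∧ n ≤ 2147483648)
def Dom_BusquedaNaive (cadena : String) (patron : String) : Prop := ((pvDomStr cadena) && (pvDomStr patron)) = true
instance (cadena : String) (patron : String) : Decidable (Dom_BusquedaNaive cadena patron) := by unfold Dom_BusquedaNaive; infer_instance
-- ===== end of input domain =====

-- B replaces A's hand-written two-level character loop by a loop of cadena.find(patron, start)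
-- calls (CPython's C-level substring search); equivalence is proved for nonempty patterns.

-- ===== PORT A =====
-- inner while: while (k < n1 and j < n2) and patron[j] == cadena[k]: k += 1; j += 1  — returns final j
def pvAInner (cs ps : List Char) (k j : Nat) : Nat :=
  if h : k < cs.length ∧ j < ps.length then
    if ps.getD j ' ' = cs.getD k ' ' then pvAInner cs ps (k + 1) (j + 1) else j
  else j
termination_by ps.length - j
decreasing_by omega

-- outer while over i, accumulating posiciones
def pvAOuter (cs ps : List Char) (p0 : Char) (i : Nat) (acc : List Int) : List Int :=
  if i < cs.length then
    pvAOuter cs ps p0 (i + 1)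
      (if cs.getD i ' ' = p0 then
        (if pvAInner cs ps i 0 = ps.length then acc ++ [(i : Int)] else acc)
       else acc)
  else acc
termination_by cs.length - i
decreasing_by omega

def BusquedaNaive (cadena : String) (patron : String) : Option (List Int) :=
  let cs := cadena.toList
  let ps := patron.toList
  if cs.length < ps.length then none
  else
    match PySem.List.pyGet? ps 0 with
    | none => none -- patron[0] raises IndexError when patron = "" (excluded by Pre_)
    | some p0 => some (pvAOuter cs ps p0 0 [])

-- ===== PORT B =====
-- while pos != -1: posiciones.append(pos); pos = cadena.find(patron, pos + 1)
-- (fuel cs.length + 1 only makes the recursion total; the loop runs at most that often)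
def pvBLoop (cs ps : List Char) (fuel : Nat) (pos : Int) (acc : List Int) : List Int :=
  match fuel with
  | 0 => acc
  | fuel + 1 =>
    if pos = -1 then acc
    else pvBLoop cs ps fuel (PySem.Chars.findFrom cs ps (pos + 1) none) (acc ++ [pos])

def BusquedaNaive_alt (cadena : String) (patron : String) : Option (List Int) :=
  let cs := cadena.toList
  let ps := patron.toList
  if cs.length < ps.length then none
  else some (pvBLoop cs ps (cs.length + 1) (PySem.Chars.find cs ps) [])

-- ===== PRECONDITION & SPEC =====
-- Pre_ excludes the empty pattern: for nonempty cadena A raises IndexError on patron[0], and at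
-- ("", "") A's [] is an artefact of its loop never running, while B naturally reports [0].
def Pre_BusquedaNaive (cadena : String) (patron : String) : Prop := patron ≠ ""
instance (cadena : String) (patron : String) : Decidable (Pre_BusquedaNaive cadena patron) := by
  unfold Pre_BusquedaNaive; infer_instance

def pvWitness_BusquedaNaive : String × String := ("abab", "ab")

def Spec_BusquedaNaive (cadena : String) (patron : String) (out : Option (List Int)) : Prop :=
  out = BusquedaNaive_alt cadena patron
instance (cadena : String) (patron : String) (out : Option (List Int)) :
    Decidable (Spec_BusquedaNaive cadena patron out) := by unfold Spec_BusquedaNaive; infer_instance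

-- ===== CLAIM (what is proved, stated in full; the proofs are below) =====
def Claim_equal_BusquedaNaive : Prop := ∀ (cadena : String) (patron : String), Dom_BusquedaNaive cadena patron → Pre_BusquedaNaive cadena patron → Spec_BusquedaNaive cadena patron (BusquedaNaive cadena patron)

-- ===== LEMMAS AND PROOFS =====

-- the match positions from index s on: both programs compute exactly these
def pvOccFrom (cs ps : List Char) (s : Nat) : List Nat :=
  (List.range' s (cs.length - s)).filter (fun t => decide (ps <+: cs.drop t))

lemma pvAInner_iff (cs ps : List Char) :
    ∀ m j k, ps.length - j ≤ m → j ≤ ps.length →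
      (pvAInner cs ps k j = ps.length ↔ ps.drop j <+: cs.drop k) := by
  intro m
  induction m with
  | zero =>
    intro j k hm hj
    have hj' : j = ps.length := by omega
    subst hj'
    rw [pvAInner, dif_neg (by omega)]
    simp
  | succ m ih =>
    intro j k hm hj
    by_cases hjl : j < ps.length
    · by_cases hkl : k < cs.length
      · rw [pvAInner, dif_pos ⟨hkl, hjl⟩]
        have hdk := List.drop_eq_getElem_cons hkl
        have hdj := List.drop_eq_getElem_cons hjl
        rw [List.getD_eq_getElem ps ' ' hjl, List.getD_eq_getElem cs ' ' hkl]
        by_cases hc : ps[j] = cs[k]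
        · rw [if_pos hc, ih (j + 1) (k + 1) (by omega) (by omega), hdk, hdj,
            List.cons_prefix_cons]
          simp [hc]
        · rw [if_neg hc]
          constructor
          · intro h; omega
          · intro hpre
            rw [hdk, hdj, List.cons_prefix_cons] at hpre
            exact absurd hpre.1 hc
      · rw [pvAInner, dif_neg (by omega)]
        have hk : cs.drop k = [] := List.drop_eq_nil_of_le (by omega)
        constructor
        · intro h; omega
        · intro hpre
          rw [hk, List.prefix_nil, List.drop_eq_nil_iff] at hpre
          omega
    · have hj' : j = ps.length := by omega
      subst hj'
      rw [pvAInner, dif_neg (by omega)]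
      simp

lemma pvAOuter_eq (cs ps : List Char) (p0 : Char) (rest : List Char) (hps : ps = p0 :: rest) :
    ∀ m i acc, cs.length - i ≤ m →
      pvAOuter cs ps p0 i acc = acc ++ (pvOccFrom cs ps i).map (fun t => (t : Int)) := by
  intro m
  induction m with
  | zero =>
    intro i acc hm
    rw [pvAOuter, if_neg (by omega)]
    simp [pvOccFrom, Nat.sub_eq_zero_of_le (by omega : cs.length ≤ i)]
  | succ m ih =>
    intro i acc hm
    by_cases hi : i < cs.length
    · rw [pvAOuter, if_pos hi, ih (i + 1) _ (by omega)]
      have hocc : pvOccFrom cs ps i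
          = (if ps <+: cs.drop i then [i] else []) ++ pvOccFrom cs ps (i + 1) := by
        unfold pvOccFrom
        rw [(by omega : cs.length - i = (cs.length - (i + 1)) + 1), List.range'_succ,
          List.filter_cons]
        by_cases hp : ps <+: cs.drop i <;> simp [hp]
      rw [hocc]
      by_cases hp : ps <+: cs.drop i
      · have hC2 : pvAInner cs ps i 0 = ps.length :=
          (pvAInner_iff cs ps ps.length 0 i (by omega) (by omega)).2 (by simpa using hp)
        have hC1 : cs.getD i ' ' = p0 := by
          rw [List.getD_eq_getElem cs ' ' hi]
          rw [hps, List.drop_eq_getElem_cons hi, List.cons_prefix_cons] at hp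
          exact hp.1.symm
        rw [if_pos hC1, if_pos hC2]
        simp [hp]
      · have hC2 : pvAInner cs ps i 0 ≠ ps.length := by
          intro h
          exact hp (by simpa using (pvAInner_iff cs ps ps.length 0 i (by omega) (by omega)).1 h)
        by_cases hC1 : cs.getD i ' ' = p0
        · rw [if_pos hC1, if_neg hC2]; simp [hp]
        · rw [if_neg hC1]; simp [hp]
    · rw [pvAOuter, if_neg hi]
      simp [pvOccFrom, Nat.sub_eq_zero_of_le (by omega : cs.length ≤ i)]

lemma pvOccFrom_nil (cs ps : List Char) (s : Nat) (h : ¬ ps <:+: cs.drop s) :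
    pvOccFrom cs ps s = [] := by
  rw [pvOccFrom, List.filter_eq_nil_iff]
  intro t ht
  rw [List.mem_range'_1] at ht
  simp only [decide_eq_true_eq]
  intro hpre
  apply h
  rw [← PySem.Chars.isIn_iff_infix, ← PySem.Chars.exists_prefix_drop_iff_isIn]
  exact ⟨t - s, by rw [List.drop_drop, (by omega : s + (t - s) = t)]; exact hpre⟩

lemma pvOccFrom_cons (cs ps : List Char) (s p : Nat) (hps : ps ≠ [])
    (hsp : s ≤ p) (hp : ps <+: cs.drop p)
    (hmin : ∀ t, s ≤ t → t < p → ¬ ps <+: cs.drop t) :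
    pvOccFrom cs ps s = p :: pvOccFrom cs ps (p + 1) := by
  have hpn : p < cs.length := by
    by_contra h
    rw [List.drop_eq_nil_of_le (by omega), List.prefix_nil] at hp
    exact hps hp
  unfold pvOccFrom
  have h1 : List.range' s (cs.length - s) = List.range' s (p - s) ++ List.range' p (cs.length - p) := by
    have h := @List.range'_append s (p - s) (cs.length - p) 1
    rw [(by omega : s + 1 * (p - s) = p), (by omega : p - s + (cs.length - p) = cs.length - s)] at h
    exact h.symm
  rw [h1, List.filter_append]
  have h2 : (List.range' s (p - s)).filter (fun t => decide (ps <+: cs.drop t)) = [] := by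
    rw [List.filter_eq_nil_iff]
    intro t ht
    rw [List.mem_range'_1] at ht
    simp only [decide_eq_true_eq]
    exact hmin t ht.1 (by omega)
  rw [h2, (by omega : cs.length - p = (cs.length - (p + 1)) + 1), List.range'_succ,
    List.filter_cons]
  simp [hp]

lemma pvBLoop_eq (cs ps : List Char) (hps : ps ≠ []) :
    ∀ fuel s acc, s ≤ cs.length → cs.length + 1 - s ≤ fuel →
      pvBLoop cs ps fuel (PySem.Chars.findFrom cs ps (s : Int) none) acc
        = acc ++ (pvOccFrom cs ps s).map (fun t => (t : Int)) := by
  intro fuel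
  induction fuel with
  | zero => intro s acc hs hm; omega
  | succ fuel ih =>
    intro s acc hs hm
    by_cases hneg : PySem.Chars.findFrom cs ps (s : Int) none = -1
    · rw [pvBLoop, if_pos hneg,
        pvOccFrom_nil cs ps s ((PySem.Chars.findFrom_natCast_eq_neg_one_iff cs ps s hs).1 hneg)]
      simp
    · rw [pvBLoop, if_neg hneg]
      obtain ⟨hge, hpre, hmin⟩ := PySem.Chars.findFrom_natCast_spec cs ps s hs hneg
      set q := PySem.Chars.findFrom cs ps (s : Int) none with hq
      have hq0 : (0 : Int) ≤ q := le_trans (by exact_mod_cast Nat.zero_le s) hge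
      have hqn : q.toNat < cs.length := by
        by_contra h
        rw [List.drop_eq_nil_of_le (by omega), List.prefix_nil] at hpre
        exact hps hpre
      have hsq : s ≤ q.toNat := by omega
      have hcast : q + 1 = ((q.toNat + 1 : Nat) : Int) := by omega
      rw [hcast, ih (q.toNat + 1) (acc ++ [q]) (by omega) (by omega),
        pvOccFrom_cons cs ps s q.toNat hps hsq hpre hmin]
      simp [(by omega : ((q.toNat : Nat) : Int) = q)]

-- ===== VERDICT (by name: the statement is the Claim_ definition above) =====
theorem BusquedaNaive_spec : Claim_equal_BusquedaNaive := by
  intro cadena patron _ hpre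
  unfold Spec_BusquedaNaive BusquedaNaive BusquedaNaive_alt
  have hps : patron.toList ≠ [] := fun h => hpre (String.toList_eq_nil_iff.1 h)
  obtain ⟨p0, rest, hps'⟩ : ∃ p0 rest, patron.toList = p0 :: rest := by
    cases h : patron.toList with
    | nil => exact absurd h hps
    | cons a l => exact ⟨a, l, rfl⟩
  by_cases hlen : cadena.toList.length < patron.toList.length
  · simp only [hlen, if_pos]
  · simp only [hlen, ite_false]
    rw [hps']
    have hget : PySem.List.pyGet? (p0 :: rest) (0 : Int) = some p0 := by
      simp [PySem.List.pyGet?, PySem.List.pyIdx?]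
    rw [hget]
    show some (pvAOuter cadena.toList (p0 :: rest) p0 0 []) = _
    rw [pvAOuter_eq cadena.toList (p0 :: rest) p0 rest rfl cadena.toList.length 0 [] (by omega)]
    rw [show PySem.Chars.find cadena.toList (p0 :: rest)
          = PySem.Chars.findFrom cadena.toList (p0 :: rest) ((0 : Nat) : Int) none by
        simp [PySem.Chars.findFrom_zero]]
    rw [pvBLoop_eq cadena.toList (p0 :: rest) (List.cons_ne_nil p0 rest)
      (cadena.toList.length + 1) 0 [] (Nat.zero_le _) (by omega)]
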